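-- pv_equiv track=rewrite | github.com/Noxville/advent-code-2021 | 17/main2.py | valid_x
-- ===== SOURCE A (Python) =====
-- def valid_x(xrnge):
--     valid = set()
--     for shift in range(-1000, 1000):
--         x, dx, steps = 0, 0 + shift, 0
--         while True:
--             x += dx
--             if xrnge[0] <= x <= xrnge[1]:
--                 valid.add(shift)
--             if dx == 0:
--                 break
--             dx = max(0, dx - 1) if dx >= 0 else min(0, dx + 1)
--             steps += 1
--     return valid
-- ===== SOURCE B (Python) =====
-- def _hits(s, lo, hi):
--     # s >= 1: positions p_k = k*s - k*(k-1)//2 for k = 1..s are nondecreasing.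
--     # Does any p_k lie in [lo, hi]?  Binary-search the least k with p_k >= lo.
--     if s * (s + 1) // 2 < lo:
--         return False
--     a, b = 1, s
--     while a < b:
--         m = (a + b) // 2
--         if m * s - m * (m - 1) // 2 >= lo:
--             b = m
--         else:
--             a = m + 1
--     return a * s - a * (a - 1) // 2 <= hi
--
--
-- def valid_x(xrnge):
--     lo, hi = xrnge
--     valid = set()
--     for s in range(-1000, 1000):
--         if s > 0:
--             hit = _hits(s, lo, hi)
--         elif s < 0:
--             hit = _hits(-s, -hi, -lo)
--         else:
--             hit = lo <= 0 <= hi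
--         if hit:
--             valid.add(s)
--     return valid
-- ===== Notes on version B (the rewrite author's own statement) =====
-- stated objective: faster
-- what changed: Per shift, B replaces A's step-by-step trajectory simulation (the inner while loop) with the closed-form position formula p_k = k*s - k*(k-1)//2 and a binary search for the least k with p_k >= lo, using monotonicity of the visited positions and a sign-mirror for negative shifts.
import Mathlib
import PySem

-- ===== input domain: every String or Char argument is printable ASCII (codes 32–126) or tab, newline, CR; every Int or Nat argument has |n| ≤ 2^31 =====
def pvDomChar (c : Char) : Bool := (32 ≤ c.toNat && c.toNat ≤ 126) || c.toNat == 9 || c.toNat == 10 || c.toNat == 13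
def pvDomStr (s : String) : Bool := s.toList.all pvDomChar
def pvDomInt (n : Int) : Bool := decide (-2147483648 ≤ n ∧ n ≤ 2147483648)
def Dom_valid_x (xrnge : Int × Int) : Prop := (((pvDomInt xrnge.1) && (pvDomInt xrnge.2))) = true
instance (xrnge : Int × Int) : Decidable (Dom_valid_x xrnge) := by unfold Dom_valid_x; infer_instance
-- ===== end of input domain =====

-- B replaces A's step-by-step trajectory simulation per shift with a closed-form
-- position formula p_k = k*s - k*(k-1)//2 and a binary search for the first position ≥ lo
-- (objective: faster — O(log S) instead of O(S) work per shift, S = |shift|). Both return the set as a list of distinct shifts.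

-- ===== PORT A =====
-- the while loop of A: state (x, dx); adds `shift` to the set on every in-range position
-- ('steps' in A is dead state and is omitted)
def loopA (lo hi : Int) (valid : PySem.Set Int) (shift x dx : Int) : PySem.Set Int :=
  let x' := x + dx
  let valid' := if lo ≤ x' ∧ x' ≤ hi then PySem.Set.add valid shift else valid
  if dx = 0 then valid'
  else loopA lo hi valid' shift x' (if dx ≥ 0 then max 0 (dx - 1) else min 0 (dx + 1))
termination_by dx.natAbs
decreasing_by split <;> omega

def valid_x (xrnge : Int × Int) : List Int :=
  (PySem.List.pyRange (-1000) 1000 1).foldl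
    (fun valid shift => loopA xrnge.1 xrnge.2 valid shift 0 (0 + shift))
    PySem.Set.empty

-- ===== PORT B =====
-- binary search: least k in [a,b] with p_k = k*s - k*(k-1)//2 ≥ lo (Source B's while loop)
def bsearchB (s lo a b : Int) : Int :=
  if a < b then
    let m := PySem.Int.floordiv (a + b) 2
    if m * s - PySem.Int.floordiv (m * (m - 1)) 2 ≥ lo then bsearchB s lo a m
    else bsearchB s lo (m + 1) b
  else a
termination_by (b - a).natAbs
decreasing_by
  all_goals
    have h1 : a ≤ PySem.Int.floordiv (a + b) 2 ∧ PySem.Int.floordiv (a + b) 2 ≤ b :=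
      PySem.Int.floordiv_two_mid_bounds (by omega)
    have h2 : PySem.Int.floordiv (a + b) 2 < b := by
      rw [PySem.Int.floordiv_lt_iff_lt_mul (by omega)]; omega
    omega

def hitsB (s lo hi : Int) : Bool :=
  if PySem.Int.floordiv (s * (s + 1)) 2 < lo then false
  else
    let a := bsearchB s lo 1 s
    decide (a * s - PySem.Int.floordiv (a * (a - 1)) 2 ≤ hi)

def valid_x_alt (xrnge : Int × Int) : List Int :=
  (PySem.List.pyRange (-1000) 1000 1).foldl
    (fun valid s =>
      let hit : Bool :=
        if s > 0 then hitsB s xrnge.1 xrnge.2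
        else if s < 0 then hitsB (-s) (-xrnge.2) (-xrnge.1)
        else decide (xrnge.1 ≤ 0 ∧ 0 ≤ xrnge.2)
      if hit then PySem.Set.add valid s else valid)
    PySem.Set.empty

-- ===== PRECONDITION & SPEC =====
def Spec_valid_x (xrnge : Int × Int) (out : List Int) : Prop := out = valid_x_alt xrnge
instance (xrnge : Int × Int) (out : List Int) : Decidable (Spec_valid_x xrnge out) := by unfold Spec_valid_x; infer_instance

-- ===== CLAIM (what is proved, stated in full; the proofs are below) =====
def Claim_equal_valid_x : Prop := ∀ (xrnge : Int × Int), Dom_valid_x xrnge → Spec_valid_x xrnge (valid_x xrnge)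

-- ===== LEMMAS AND PROOFS =====

-- the closed-form position formula
def pf (s k : Int) : Int := k * s - PySem.Int.floordiv (k * (k - 1)) 2

theorem fd2 (n : Int) (h : Even n) : PySem.Int.floordiv n 2 * 2 = n := by
  obtain ⟨c, rfl⟩ := h
  rw [PySem.Int.floordiv_eq_ediv_of_pos (by omega)]
  omega

theorem even_mul_pred (k : Int) : Even (k * (k - 1)) := by
  rcases Int.even_or_odd k with h | h
  · exact h.mul_right _
  · exact (Int.even_sub_one.mpr (Int.not_even_iff_odd.mpr h)).mul_left _

theorem pf_zero (s : Int) : pf s 0 = 0 := by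
  have := fd2 (0 * (0 - 1)) (by norm_num)
  unfold pf; omega

theorem pf_rec (s k : Int) : pf s (k + 1) = pf s k + (s - k) := by
  have h1 := fd2 ((k + 1) * (k + 1 - 1)) (by simpa using even_mul_pred (k + 1))
  have h2 := fd2 (k * (k - 1)) (even_mul_pred k)
  have h3 : (k + 1) * (k + 1 - 1) - k * (k - 1) = 2 * k := by ring
  unfold pf
  nlinarith [h1, h2]

theorem pf_mono (s j k : Int) (_h1 : 1 ≤ j) (h2 : j ≤ k) (h3 : k ≤ s) : pf s j ≤ pf s k := by
  obtain ⟨n, rfl⟩ : ∃ n : Nat, k = j + n := ⟨(k - j).toNat, by omega⟩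
  clear h2
  induction n with
  | zero => simp
  | succ n ih =>
    push_cast at h3 ⊢
    have h := ih (by omega)
    rw [show j + ((n : Int) + 1) = (j + (n : Int)) + 1 by ring, pf_rec]
    omega

-- Boolean form of A's while loop: "some visited position lies in [lo, hi]"
def loopH (lo hi x dx : Int) : Bool :=
  let x' := x + dx
  let hit := decide (lo ≤ x' ∧ x' ≤ hi)
  if dx = 0 then hit
  else hit || loopH lo hi x' (if dx ≥ 0 then max 0 (dx - 1) else min 0 (dx + 1))
termination_by dx.natAbs
decreasing_by split <;> omega

theorem loopA_eq_loopH (lo hi : Int) (valid : PySem.Set Int) (shift x dx : Int) :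
    loopA lo hi valid shift x dx =
      if loopH lo hi x dx then PySem.Set.add valid shift else valid := by
  generalize hn : dx.natAbs = n
  induction n generalizing valid x dx with
  | zero =>
    have hdx : dx = 0 := by omega
    subst hdx
    rw [loopA, loopH]
    by_cases hp : lo ≤ x + 0 ∧ x + 0 ≤ hi <;> simp
  | succ n ih =>
    have hdx : dx ≠ 0 := by omega
    rw [loopA, loopH]
    simp only [if_neg hdx]
    rw [ih _ _ _ (by split <;> omega)]
    by_cases hp : lo ≤ x + dx ∧ x + dx ≤ hi
    · simp only [if_pos hp, decide_eq_true hp, Bool.true_or]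
      cases hL : loopH lo hi (x + dx) (if dx ≥ 0 then max 0 (dx - 1) else min 0 (dx + 1)) <;>
        simp
    · simp [hp]

theorem loopH_pos (lo hi s : Int) (hs : 1 ≤ s) :
    ∀ n : Nat, ∀ j : Int, 0 ≤ j → j + n = s →
      (loopH lo hi (pf s j) (s - j) = true ↔
        (∃ k, j + 1 ≤ k ∧ k ≤ s ∧ lo ≤ pf s k ∧ pf s k ≤ hi) ∨ (lo ≤ pf s s ∧ pf s s ≤ hi)) := by
  intro n
  induction n with
  | zero =>
    intro j hj hjs
    have hjs' : j = s := by omega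
    subst hjs'
    conv_lhs => rw [loopH]
    simp only [sub_self, add_zero, if_true, decide_eq_true_eq]
    constructor
    · intro h; exact Or.inr h
    · rintro (⟨k, hk1, hk2, _⟩ | h)
      · omega
      · exact h
  | succ n ih =>
    intro j hj hjs
    have hlt : j < s := by omega
    rw [loopH]
    have hdx : ¬ (s - j = 0) := by omega
    have hx' : pf s j + (s - j) = pf s (j + 1) := by rw [pf_rec]
    have hdx' : (if s - j ≥ 0 then max 0 (s - j - 1) else min 0 (s - j + 1)) = s - (j + 1) := by
      split <;> omega
    simp only [if_neg hdx, hx', hdx', Bool.or_eq_true, decide_eq_true_eq]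
    rw [ih (j + 1) (by omega) (by push_cast at hjs ⊢; omega)]
    constructor
    · rintro (h | ⟨k, hk⟩ | h)
      · exact Or.inl ⟨j + 1, by omega, by omega, h.1, h.2⟩
      · exact Or.inl ⟨k, by omega, hk.2.1, hk.2.2⟩
      · exact Or.inr h
    · rintro (⟨k, hk1, hk2, hk3, hk4⟩ | h)
      · by_cases hkj : k = j + 1
        · subst hkj; exact Or.inl ⟨hk3, hk4⟩
        · exact Or.inr (Or.inl ⟨k, by omega, hk2, hk3, hk4⟩)
      · exact Or.inr (Or.inr h)

theorem loopH_zero_pos (lo hi s : Int) (hs : 1 ≤ s) :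
    (loopH lo hi 0 s = true ↔ ∃ k, 1 ≤ k ∧ k ≤ s ∧ lo ≤ pf s k ∧ pf s k ≤ hi) := by
  have h := loopH_pos lo hi s hs s.toNat 0 le_rfl (by omega)
  rw [pf_zero] at h
  simp only [zero_add, sub_zero] at h
  rw [h]
  constructor
  · rintro (⟨k, hk⟩ | h)
    · exact ⟨k, hk⟩
    · exact ⟨s, by omega, le_rfl, h.1, h.2⟩
  · intro ⟨k, hk⟩; exact Or.inl ⟨k, hk⟩

theorem loopH_neg (lo hi : Int) :
    ∀ n : Nat, ∀ x dx : Int, dx ≤ 0 → dx = -(n : Int) →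
      loopH lo hi x dx = loopH (-hi) (-lo) (-x) (-dx) := by
  intro n
  induction n with
  | zero =>
    intro x dx _ hdx
    have : dx = 0 := by omega
    subst this
    conv_lhs => rw [loopH]
    conv_rhs => rw [loopH]
    simp only [neg_zero, add_zero, if_true, decide_eq_decide]
    omega
  | succ n ih =>
    intro x dx hle hdx
    have hdx0 : dx ≠ 0 := by omega
    have hndx0 : -dx ≠ 0 := by omega
    conv_lhs => rw [loopH]
    conv_rhs => rw [loopH]
    simp only [if_neg hdx0, if_neg hndx0]
    have e1 : (if dx ≥ 0 then max 0 (dx - 1) else min 0 (dx + 1)) = dx + 1 := by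
      split <;> omega
    have e2 : (if -dx ≥ 0 then max 0 (-dx - 1) else min 0 (-dx + 1)) = -(dx + 1) := by
      split <;> omega
    rw [e1, e2]
    have h3 : -x + -dx = -(x + dx) := by ring
    rw [h3, ih (x + dx) (dx + 1) (by omega) (by omega)]
    congr 1
    simp only [decide_eq_decide]
    omega

theorem bsearch_spec (s lo : Int) :
    ∀ n : Nat, ∀ a b : Int, (b - a).toNat = n → 1 ≤ a → a ≤ b → b ≤ s → lo ≤ pf s b →
      (∀ k, 1 ≤ k → k < a → pf s k < lo) →
      (a ≤ bsearchB s lo a b ∧ bsearchB s lo a b ≤ b ∧ lo ≤ pf s (bsearchB s lo a b) ∧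
        (∀ k, 1 ≤ k → k < bsearchB s lo a b → pf s k < lo)) := by
  intro n
  induction n using Nat.strong_induction_on with
  | _ n ih =>
    intro a b hn h1 hab hbs hlob hbelow
    rw [bsearchB]
    by_cases hlt : a < b
    · simp only [if_pos hlt]
      have hmb : a ≤ PySem.Int.floordiv (a + b) 2 ∧ PySem.Int.floordiv (a + b) 2 ≤ b :=
        PySem.Int.floordiv_two_mid_bounds (by omega)
      have hmlt : PySem.Int.floordiv (a + b) 2 < b := by
        rw [PySem.Int.floordiv_lt_iff_lt_mul (by omega)]; omega
      set m := PySem.Int.floordiv (a + b) 2 with hm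
      by_cases hc : m * s - PySem.Int.floordiv (m * (m - 1)) 2 ≥ lo
      · simp only [if_pos hc]
        have hpm : lo ≤ pf s m := by unfold pf; omega
        obtain ⟨g1, g2, g3, g4⟩ := ih (m - a).toNat (by omega) a m rfl h1 (by omega) (by omega) hpm hbelow
        exact ⟨g1, by omega, g3, g4⟩
      · simp only [if_neg hc]
        have hpm : pf s m < lo := by unfold pf; omega
        have hbelow' : ∀ k, 1 ≤ k → k < m + 1 → pf s k < lo := by
          intro k hk1 hk2
          by_cases hka : k < a
          · exact hbelow k hk1 hka
          · have := pf_mono s k m hk1 (by omega) (by omega)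
            omega
        obtain ⟨g1, g2, g3, g4⟩ := ih (b - (m + 1)).toNat (by omega) (m + 1) b rfl (by omega) (by omega) hbs hlob hbelow'
        exact ⟨by omega, g2, g3, g4⟩
    · simp only [if_neg hlt]
      have hba : a = b := by omega
      exact ⟨le_rfl, hab, by rw [hba]; exact hlob, hbelow⟩

theorem hitsB_iff (s lo hi : Int) (hs : 1 ≤ s) :
    (hitsB s lo hi = true ↔ ∃ k, 1 ≤ k ∧ k ≤ s ∧ lo ≤ pf s k ∧ pf s k ≤ hi) := by
  have hT : PySem.Int.floordiv (s * (s + 1)) 2 = pf s s := by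
    have h1 := fd2 (s * (s + 1)) (by simpa [mul_comm] using even_mul_pred (s + 1))
    have h2 := fd2 (s * (s - 1)) (even_mul_pred s)
    have h3 : s * (s + 1) + s * (s - 1) = 2 * (s * s) := by ring
    unfold pf
    linarith
  rw [hitsB, hT]
  by_cases hg : pf s s < lo
  · simp only [if_pos hg, Bool.false_eq_true, false_iff]
    rintro ⟨k, hk1, hk2, hk3, hk4⟩
    have := pf_mono s k s hk1 hk2 le_rfl
    omega
  · simp only [if_neg hg]
    obtain ⟨hr1, hr2, hr3, hr4⟩ :=
      bsearch_spec s lo (s - 1).toNat 1 s (by omega) le_rfl hs le_rfl (by omega)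
        (by intro k hk1 hk2; omega)
    set r := bsearchB s lo 1 s with hr
    simp only [decide_eq_true_eq]
    constructor
    · intro h
      exact ⟨r, by omega, hr2, hr3, h⟩
    · rintro ⟨k, hk1, hk2, hk3, hk4⟩
      have hkr : r ≤ k := by
        by_contra hcon
        have := hr4 k hk1 (by omega)
        omega
      have := pf_mono s r k hr1 hkr hk2
      show pf s r ≤ hi
      omega

theorem step_eq (lo hi : Int) (valid : PySem.Set Int) (s : Int) :
    loopA lo hi valid s 0 (0 + s) =
      (if (if s > 0 then hitsB s lo hi
            else if s < 0 then hitsB (-s) (-hi) (-lo)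
            else decide (lo ≤ 0 ∧ 0 ≤ hi)) then PySem.Set.add valid s else valid) := by
  rw [loopA_eq_loopH, zero_add]
  congr 1
  rcases lt_trichotomy s 0 with h | h | h
  · rw [if_neg (by omega), if_pos h]
    have hneg := loopH_neg lo hi (-s).toNat 0 s (by omega) (by omega)
    rw [neg_zero] at hneg
    rw [hneg]
    exact propext
      ((loopH_zero_pos (-hi) (-lo) (-s) (by omega)).trans (hitsB_iff (-s) (-hi) (-lo) (by omega)).symm)
  · subst h
    rw [if_neg (by omega), if_neg (by omega)]
    have hz : loopH lo hi 0 0 = decide (lo ≤ 0 ∧ 0 ≤ hi) := by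
      conv_lhs => rw [loopH]
      norm_num
    rw [hz]
  · rw [if_pos h]
    exact propext
      ((loopH_zero_pos lo hi s (by omega)).trans (hitsB_iff s lo hi (by omega)).symm)

-- ===== VERDICT (by name: the statement is the Claim_ definition above) =====
theorem valid_x_spec : Claim_equal_valid_x := by
  intro xrnge _
  unfold Spec_valid_x valid_x valid_x_alt
  have hf : (fun (valid : PySem.Set Int) (shift : Int) =>
      loopA xrnge.1 xrnge.2 valid shift 0 (0 + shift)) =
      (fun (valid : PySem.Set Int) (s : Int) =>
        let hit : Bool :=
          if s > 0 then hitsB s xrnge.1 xrnge.2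
          else if s < 0 then hitsB (-s) (-xrnge.2) (-xrnge.1)
          else decide (xrnge.1 ≤ 0 ∧ 0 ≤ xrnge.2)
        if hit then PySem.Set.add valid s else valid) := by
    funext valid s
    exact step_eq xrnge.1 xrnge.2 valid s
  rw [hf]
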